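-- pv_equiv track=rewrite | github.com/Pedrogush/magic_online_game_history_recorder | find.py | add_rounds_to_games_list
-- ===== SOURCE A (Python) =====
-- def add_rounds_to_games_list(games_list):
--     games_list = sorted(games_list, key=lambda x: x['ticket'])
--     last_game_num = 0
--     round = 1
--     for i, game in enumerate(games_list):
--         if game['number'] < last_game_num:
--             round += 1
--         last_game_num = game['number']
--         games_list[i]['round'] = round
--     return games_list
-- ===== SOURCE B (Python) =====
-- from itertools import accumulate
--
--
-- def add_rounds_to_games_list(games_list):
--     games_list = sorted(games_list, key=lambda g: g['ticket'])
--     nums = [g['number'] for g in games_list]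
--     bumps = [1 if n < p else 0 for p, n in zip([0] + nums, nums)]
--     rounds = list(accumulate(bumps, initial=1))[1:]
--     for g, r in zip(games_list, rounds):
--         g['round'] = r
--     return games_list
-- ===== Notes on version B (the rewrite author's own statement) =====
-- stated objective: alternative
-- what changed: A's single stateful loop carrying (last_game_num, round) is replaced by a pipeline: extract the number column, build a 0/1 bump list by zipping it with its shifted self, prefix-sum it with itertools.accumulate, then write the rounds in one zip pass.
import Mathlib
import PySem

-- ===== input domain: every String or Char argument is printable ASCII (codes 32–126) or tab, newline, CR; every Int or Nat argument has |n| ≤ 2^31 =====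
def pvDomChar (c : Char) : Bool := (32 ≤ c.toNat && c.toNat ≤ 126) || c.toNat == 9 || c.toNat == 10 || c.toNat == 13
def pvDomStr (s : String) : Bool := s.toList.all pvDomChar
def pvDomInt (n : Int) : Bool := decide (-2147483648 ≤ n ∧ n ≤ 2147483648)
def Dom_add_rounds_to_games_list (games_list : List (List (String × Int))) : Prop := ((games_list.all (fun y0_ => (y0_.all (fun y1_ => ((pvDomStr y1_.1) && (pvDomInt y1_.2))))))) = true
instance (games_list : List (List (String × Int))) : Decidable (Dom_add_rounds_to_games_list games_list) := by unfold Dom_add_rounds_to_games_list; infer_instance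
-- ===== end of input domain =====

-- B replaces A's running (last_number, round) state machine by a zip/prefix-sum pipeline
-- (bump list via zip with the shifted number list, itertools.accumulate, then one write pass);
-- same cost, different decomposition. Both versions mutate the shared game dicts in place
-- (writing 'round'); the equivalence proved here is about the returned list.

-- ===== PORT A =====
def pvTicketA (g : List (String × Int)) : Int := ((PySem.Dict.mk g).get? "ticket").getD 0
def pvNumA (g : List (String × Int)) : Int := ((PySem.Dict.mk g).get? "number").getD 0
-- A's for-loop over the sorted list, carrying (last_game_num, round)
def pvLoopA : List (List (String × Int)) → Int → Int → List (List (String × Int))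
  | [], _, _ => []
  | g :: rest, last, round =>
      let round := if pvNumA g < last then round + 1 else round
      (((PySem.Dict.mk g).insert "round" round).items) :: pvLoopA rest (pvNumA g) round
def add_rounds_to_games_list (games_list : List (List (String × Int))) : List (List (String × Int)) :=
  pvLoopA (PySem.List.sorted games_list pvTicketA false) 0 1

-- ===== PORT B =====
def pvTicketB (g : List (String × Int)) : Int := ((PySem.Dict.mk g).get? "ticket").getD 0
def pvNumB (g : List (String × Int)) : Int := ((PySem.Dict.mk g).get? "number").getD 0
-- itertools.accumulate(bumps, initial=1) without the leading 1 (Source B's [1:])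
def pvAccumB : List Int → Int → List Int
  | [], _ => []
  | x :: xs, s => (s + x) :: pvAccumB xs (s + x)
def add_rounds_to_games_list_alt (games_list : List (List (String × Int))) : List (List (String × Int)) :=
  let gs := PySem.List.sorted games_list pvTicketB false
  let nums := gs.map pvNumB
  let bumps := List.zipWith (fun p n => if n < p then (1 : Int) else 0) (0 :: nums) nums
  let rounds := pvAccumB bumps 1
  (gs.zip rounds).map (fun gr => ((PySem.Dict.mk gr.1).insert "round" gr.2).items)

-- ===== PRECONDITION & SPEC =====
-- Pre_ excludes games missing a 'ticket' or 'number' key (Python A raises KeyError there), and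
-- association lists with duplicate keys, which do not represent any Python dict input.
def Pre_add_rounds_to_games_list (games_list : List (List (String × Int))) : Prop :=
  ∀ g ∈ games_list, "ticket" ∈ g.map Prod.fst ∧ "number" ∈ g.map Prod.fst ∧ (g.map Prod.fst).Nodup
instance (games_list : List (List (String × Int))) : Decidable (Pre_add_rounds_to_games_list games_list) := by unfold Pre_add_rounds_to_games_list; infer_instance
def pvWitness_add_rounds_to_games_list : (List (List (String × Int))) :=
  [[("ticket", 2), ("number", 1)], [("ticket", 1), ("number", 5)]]
def Spec_add_rounds_to_games_list (games_list : List (List (String × Int))) (out : List (List (String × Int))) : Prop := out = add_rounds_to_games_list_alt games_list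
instance (games_list : List (List (String × Int))) (out : List (List (String × Int))) : Decidable (Spec_add_rounds_to_games_list games_list out) := by unfold Spec_add_rounds_to_games_list; infer_instance

-- ===== CLAIM (what is proved, stated in full; the proofs are below) =====
def Claim_equal_add_rounds_to_games_list : Prop := ∀ (games_list : List (List (String × Int))), Dom_add_rounds_to_games_list games_list → Pre_add_rounds_to_games_list games_list → Spec_add_rounds_to_games_list games_list (add_rounds_to_games_list games_list)

-- ===== LEMMAS AND PROOFS =====

-- the round numbers A assigns, as a list, from state (last, round)
def pvRounds : List (List (String × Int)) → Int → Int → List Int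
  | [], _, _ => []
  | g :: rest, last, round =>
      let round := if pvNumA g < last then round + 1 else round
      round :: pvRounds rest (pvNumA g) round

lemma loopA_eq_zip (gs : List (List (String × Int))) : ∀ last round : Int,
    pvLoopA gs last round =
      (gs.zip (pvRounds gs last round)).map
        (fun gr => ((PySem.Dict.mk gr.1).insert "round" gr.2).items) := by
  induction gs with
  | nil => intro last round; rfl
  | cons g rest ih =>
      intro last round
      simp [pvLoopA, pvRounds, ih]

lemma rounds_eq_accum (gs : List (List (String × Int))) : ∀ last round : Int,
    pvRounds gs last round =
      pvAccumB (List.zipWith (fun p n => if n < p then (1 : Int) else 0)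
        (last :: gs.map pvNumB) (gs.map pvNumB)) round := by
  induction gs with
  | nil => intro last round; rfl
  | cons g rest ih =>
      intro last round
      have hnum : pvNumA g = pvNumB g := rfl
      simp only [List.map_cons, List.zipWith_cons_cons, pvAccumB, pvRounds, ← ih, hnum]
      split_ifs <;> simp

-- ===== VERDICT (by name: the statement is the Claim_ definition above) =====
theorem add_rounds_to_games_list_spec : Claim_equal_add_rounds_to_games_list := by
  intro gl _ _
  show add_rounds_to_games_list gl = add_rounds_to_games_list_alt gl
  have hkey : pvTicketA = pvTicketB := rfl
  simp only [add_rounds_to_games_list, add_rounds_to_games_list_alt, hkey,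
    loopA_eq_zip, rounds_eq_accum]
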